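-- pv_equiv track=rewrite | github.com/Nikilesh731/Pune-Agri-Hackathon-problem-statement-9 | ai-services/app/modules/document_processing/handlers/base_handler.py | _sanitize_reasoning
-- ===== SOURCE A (Python) =====
-- from typing import Dict, List, Optional, Any
--
-- def _sanitize_reasoning(reasoning: List[str]) -> List[str]:
--     """Sanitize reasoning list to follow strict contract
--
--     Args:
--         reasoning: Raw reasoning list
--
--     Returns:
--         Sanitized reasoning list following contract:
--         1) "Fields extracted: ..."
--         2) "Missing required fields: ..." (ONLY if missing)
--     """
--     sanitized = []
--     seen = set()
--
--     for reason in reasoning: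
--         # Remove "missing required fields: none" messages
--         if reason.lower().startswith("missing required fields: none"):
--             continue
--
--         # Remove duplicates
--         if reason in seen:
--             continue
--         seen.add(reason)
--
--         sanitized.append(reason)
--
--     # Enforce order: fields extracted first, missing fields second
--     fields_extracted = [r for r in sanitized if r.startswith("Fields extracted:")]
--     missing_fields = [r for r in sanitized if r.startswith("Missing required fields:")]
--     other = [r for r in sanitized if not (r.startswith("Fields extracted:") or r.startswith("Missing required fields:"))]
--
--     # Return in proper order
--     return fields_extracted + missing_fields + other
-- ===== SOURCE B (Python) =====
-- from typing import List
--
-- def _sanitize_reasoning(reasoning: List[str]) -> List[str]: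
--     """Decorate-sort-undecorate: record each kept reason's first index in a dict,
--     then produce the result with one stable sort keyed by (category, first index)."""
--     first = {}
--     for i, reason in enumerate(reasoning):
--         if reason.lower().startswith("missing required fields: none") or reason in first:
--             continue
--         first[reason] = i
--
--     def _bucket(r):
--         if r.startswith("Fields extracted:"):
--             return 0
--         if r.startswith("Missing required fields:"):
--             return 1
--         return 2
--
--     return sorted(first, key=lambda r: (_bucket(r), first[r]))
-- ===== Notes on version B (the rewrite author's own statement) =====
-- stated objective: alternative
-- what changed: Replaces A's dedup loop plus three filtering passes and list concatenation with decorate-sort-undecorate: one pass records each kept reason's first index in a dict, then a single stable sort keyed by (category bucket, first index) produces the ordering.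
import Mathlib
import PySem

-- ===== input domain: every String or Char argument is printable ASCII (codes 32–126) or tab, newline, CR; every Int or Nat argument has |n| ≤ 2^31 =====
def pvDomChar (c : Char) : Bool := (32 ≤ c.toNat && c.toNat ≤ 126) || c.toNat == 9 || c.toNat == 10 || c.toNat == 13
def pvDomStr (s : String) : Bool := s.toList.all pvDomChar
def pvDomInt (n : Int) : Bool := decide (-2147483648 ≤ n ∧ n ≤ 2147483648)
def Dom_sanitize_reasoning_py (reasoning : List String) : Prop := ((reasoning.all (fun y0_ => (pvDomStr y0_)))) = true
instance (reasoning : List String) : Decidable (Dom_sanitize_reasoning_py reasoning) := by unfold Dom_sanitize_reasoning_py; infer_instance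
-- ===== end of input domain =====

-- B replaces A's dedup loop plus three filtering passes with decorate-sort-undecorate
-- (a dict of first-occurrence indices and one stable sort keyed by (category, first index)); return values only.

-- the literal prefix tests both Pythons perform
def pvSkip (r : String) : Bool := PySem.Str.startswith (PySem.Str.lower r) "missing required fields: none"
def pvP1 (r : String) : Bool := PySem.Str.startswith r "Fields extracted:"
def pvP2 (r : String) : Bool := PySem.Str.startswith r "Missing required fields:"

-- ===== PORT A =====
-- A's loop: build the deduplicated `sanitized` list (append ≡ cons onto the recursive result)
def pvADedup : List String → PySem.Set String → List String
  | [], _ => []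
  | r :: rest, seen =>
    if pvSkip r then pvADedup rest seen
    else if PySem.Set.contains seen r then pvADedup rest seen
    else r :: pvADedup rest (PySem.Set.add seen r)

def sanitize_reasoning_py (reasoning : List String) : List String :=
  let sanitized := pvADedup reasoning PySem.Set.empty
  let fields_extracted := sanitized.filter (fun r => pvP1 r)
  let missing_fields := sanitized.filter (fun r => pvP2 r)
  let other := sanitized.filter (fun r => !(pvP1 r || pvP2 r))
  fields_extracted ++ missing_fields ++ other

-- ===== PORT B =====
-- B's _bucket helper
def pvBucket (r : String) : Int := if pvP1 r then 0 else if pvP2 r then 1 else 2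

-- B's loop: 'for i, reason in enumerate(reasoning)' recording each kept reason's first index
def pvFirst : List String → Int → PySem.Dict String Int → PySem.Dict String Int
  | [], _, d => d
  | r :: rest, i, d =>
    if pvSkip r || PySem.Dict.contains d r then pvFirst rest (i + 1) d
    else pvFirst rest (i + 1) (d.insert r i)

def sanitize_reasoning_py_alt (reasoning : List String) : List String :=
  let first := pvFirst reasoning 0 PySem.Dict.empty
  PySem.List.sorted2 (PySem.Dict.keys first) pvBucket (fun r => first.getD r 0)

-- ===== PRECONDITION & SPEC =====
def Spec_sanitize_reasoning_py (reasoning : List String) (out : List String) : Prop := out = sanitize_reasoning_py_alt reasoning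
instance (reasoning : List String) (out : List String) : Decidable (Spec_sanitize_reasoning_py reasoning out) := by unfold Spec_sanitize_reasoning_py; infer_instance

-- ===== CLAIM (what is proved, stated in full; the proofs are below) =====
def Claim_equal_sanitize_reasoning_py : Prop := ∀ (reasoning : List String), Dom_sanitize_reasoning_py reasoning → Spec_sanitize_reasoning_py reasoning (sanitize_reasoning_py reasoning)

-- ===== LEMMAS AND PROOFS =====

-- the two literal prefixes are incompatible ('F' vs 'M' at position 0)
theorem pvP1_not_pvP2 (r : String) (h : pvP1 r = true) : pvP2 r = false := by
  unfold pvP1 pvP2 at *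
  simp only [PySem.Str.startswith_eq] at *
  rw [PySem.Chars.startswith_iff] at h
  by_contra hc
  rw [Bool.not_eq_false, PySem.Chars.startswith_iff] at hc
  obtain ⟨t1, e1⟩ := h
  obtain ⟨t2, e2⟩ := hc
  have hF : r.toList[0]? = some 'F' := by rw [← e1]; rfl
  have hM : r.toList[0]? = some 'M' := by rw [← e2]; rfl
  rw [hF] at hM
  simp at hM

-- proof-side mirror of B's loop: the (reason, first index) pairs B's dict accumulates
def pvAnnot : List String → Int → List String → List (String × Int)
  | [], _, _ => []
  | r :: rest, i, seen =>
    if pvSkip r || PySem.Set.contains seen r then pvAnnot rest (i + 1) seen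
    else (r, i) :: pvAnnot rest (i + 1) (seen ++ [r])

theorem pvSetContains_true (seen : List String) (r : String) (h : r ∈ seen) :
    PySem.Set.contains seen r = true := by simp [PySem.Set.contains, h]

theorem pvSetContains_false (seen : List String) (r : String) (h : r ∉ seen) :
    PySem.Set.contains seen r = false := by simp [PySem.Set.contains, h]

-- B's dict is its start dict's items followed by the annotated fresh keys
theorem pvFirst_items (l : List String) : ∀ (i : Int) (d : PySem.Dict String Int),
    d.keys.Nodup → (pvFirst l i d).items = d.items ++ pvAnnot l i d.keys := by
  induction l with
  | nil => intro i d _; simp [pvFirst, pvAnnot]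
  | cons r rest ih =>
    intro i d hnd
    have hc : PySem.Dict.contains d r = PySem.Set.contains d.keys r := by
      rw [Bool.eq_iff_iff]
      simp [PySem.Dict.contains_eq_decide_mem_keys, PySem.Set.contains]
    simp only [pvFirst, pvAnnot, hc]
    by_cases h : (pvSkip r || PySem.Set.contains d.keys r) = true
    · rw [if_pos h, if_pos h, ih _ _ hnd]
    · have h' := h
      simp only [Bool.or_eq_true, not_or, Bool.not_eq_true] at h'
      have hdc : PySem.Dict.contains d r = false := by rw [hc]; exact h'.2
      rw [if_neg h, if_neg h]
      rw [ih _ _ (PySem.Dict.nodup_keys_insert d r i hnd),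
          PySem.Dict.items_insert_of_not_contains d i hdc,
          PySem.Dict.keys_insert_of_not_contains d i hdc]
      simp

-- the annotated keys are exactly A's deduplicated list
theorem pvAnnot_map_fst (l : List String) : ∀ (i : Int) (seen : List String),
    (pvAnnot l i seen).map (fun p => p.1) = pvADedup l seen := by
  induction l with
  | nil => intro i seen; simp [pvAnnot, pvADedup]
  | cons r rest ih =>
    intro i seen
    by_cases hs : pvSkip r = true
    · simp [pvAnnot, pvADedup, hs, ih]
    · by_cases hm : r ∈ seen
      · simp [pvAnnot, pvADedup, hs, hm, ih, PySem.Set.contains]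
      · simp [pvAnnot, pvADedup, hs, hm, ih, PySem.Set.contains]

-- annotation indices are ≥ i and strictly increasing
theorem pvAnnot_snd (l : List String) : ∀ (i : Int) (seen : List String),
    (∀ p ∈ pvAnnot l i seen, i ≤ p.2) ∧ (pvAnnot l i seen).Pairwise (fun p q => p.2 < q.2) := by
  induction l with
  | nil => intro i seen; simp [pvAnnot]
  | cons r rest ih =>
    intro i seen
    by_cases h : (pvSkip r || PySem.Set.contains seen r) = true
    · simp only [pvAnnot, if_pos h]
      obtain ⟨h1, h2⟩ := ih (i + 1) seen
      exact ⟨fun p hp => le_trans (by omega) (h1 p hp), h2⟩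
    · simp only [pvAnnot, if_neg h]
      obtain ⟨h1, h2⟩ := ih (i + 1) (seen ++ [r])
      refine ⟨?_, List.Pairwise.cons ?_ h2⟩
      · intro p hp
        rcases List.mem_cons.mp hp with rfl | hp'
        · simp
        · exact le_trans (by omega) (h1 p hp')
      · intro q hq
        have := h1 q hq
        show i < q.2
        omega

-- A's deduplicated list is duplicate-free and disjoint from `seen`
theorem pvADedup_nodup (l : List String) : ∀ (seen : List String),
    (pvADedup l seen).Nodup ∧ ∀ x ∈ pvADedup l seen, x ∉ seen := by
  induction l with
  | nil => intro seen; simp [pvADedup]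
  | cons r rest ih =>
    intro seen
    by_cases hs : pvSkip r = true
    · simp only [pvADedup, if_pos hs]; exact ih seen
    · by_cases hm : r ∈ seen
      · simp only [pvADedup, if_neg hs, if_pos (pvSetContains_true seen r hm)]; exact ih seen
      · have hcf := pvSetContains_false seen r hm
        simp only [pvADedup, if_neg hs, hcf, Bool.false_eq_true, if_false]
        obtain ⟨h1, h2⟩ := ih (PySem.Set.add seen r)
        have hadd : PySem.Set.add seen r = seen ++ [r] := by simp [PySem.Set.add, PySem.Set.contains, hm]
        have hrs : r ∉ seen := hm
        refine ⟨List.nodup_cons.mpr ⟨?_, h1⟩, ?_⟩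
        · intro hr
          have := h2 r hr
          rw [hadd] at this
          exact this (by simp)
        · intro x hx
          rcases List.mem_cons.mp hx with rfl | hx'
          · exact hrs
          · intro hxs
            have := h2 x hx'
            rw [hadd] at this
            exact this (by simp [hxs])

-- sorted2 with Int keys is sorted with the lexicographic pair key
theorem sorted2_eq_sorted_lex {α : Type} (xs : List α) (k1 k2 : α → Int) :
    PySem.List.sorted2 xs k1 k2 = PySem.List.sorted xs (fun x => toLex (k1 x, k2 x)) := by
  have hb : (fun a b => decide (k1 a < k1 b) || (!decide (k1 b < k1 a) && decide (k2 a < k2 b)))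
      = fun a b : α => decide (toLex (k1 a, k2 a) < toLex (k1 b, k2 b)) := by
    funext a b
    have hlex : (toLex (k1 a, k2 a) < toLex (k1 b, k2 b)) ↔
        (k1 a < k1 b ∨ (k1 a = k1 b ∧ k2 a < k2 b)) := Prod.Lex.lt_iff
    by_cases h1 : k1 a < k1 b <;> by_cases h2 : k1 b < k1 a <;> by_cases h3 : k2 a < k2 b <;>
      simp [h1, h2, h3, hlex] <;> omega
  show List.foldl (fun acc x => PySem.List.insertBy
        (fun a b => decide (k1 a < k1 b) || (!decide (k1 b < k1 a) && decide (k2 a < k2 b))) x acc) [] xs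
      = List.foldl (fun acc x => PySem.List.insertBy
        (fun a b => decide (toLex (k1 a, k2 a) < toLex (k1 b, k2 b))) x acc) [] xs
  rw [hb]

-- pvP2 implies not pvP1 (contrapositive of pvP1_not_pvP2)
theorem pvP2_not_pvP1 (x : String) (h2 : pvP2 x = true) : pvP1 x = false := by
  by_contra h1
  rw [Bool.not_eq_false] at h1
  rw [pvP1_not_pvP2 x h1] at h2
  exact Bool.false_ne_true h2

-- the main computation: B's sort reproduces A's three filtered blocks
theorem pv_main (reasoning : List String) :
    sanitize_reasoning_py_alt reasoning = sanitize_reasoning_py reasoning := by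
  simp only [sanitize_reasoning_py_alt, sanitize_reasoning_py]
  rw [sorted2_eq_sorted_lex]
  have hitems : (pvFirst reasoning 0 PySem.Dict.empty).items = pvAnnot reasoning 0 [] := by
    have h := pvFirst_items reasoning 0 PySem.Dict.empty PySem.Dict.nodup_keys_empty
    simpa [PySem.Dict.empty, PySem.Dict.keys, PySem.Dict.items] using h
  have hkeys : (pvFirst reasoning 0 PySem.Dict.empty).keys = pvADedup reasoning [] := by
    simp only [PySem.Dict.keys]
    rw [hitems]
    exact pvAnnot_map_fst reasoning 0 []
  have hndS : (pvADedup reasoning ([] : List String)).Nodup := (pvADedup_nodup reasoning []).1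
  have hndK : (pvFirst reasoning 0 PySem.Dict.empty).keys.Nodup := by rw [hkeys]; exact hndS
  have hget : ∀ p ∈ pvAnnot reasoning 0 [], (pvFirst reasoning 0 PySem.Dict.empty).getD p.1 0 = p.2 := by
    intro p hp
    exact PySem.Dict.getD_of_mem_items _ (by rw [hitems]; simpa using hp) hndK 0
  have hpairS : (pvADedup reasoning ([] : List String)).Pairwise
      (fun a b => (pvFirst reasoning 0 PySem.Dict.empty).getD a 0 < (pvFirst reasoning 0 PySem.Dict.empty).getD b 0) := by
    have h2 := (pvAnnot_snd reasoning 0 []).2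
    have h3 : (pvAnnot reasoning 0 []).Pairwise
        (fun p q => (pvFirst reasoning 0 PySem.Dict.empty).getD p.1 0 < (pvFirst reasoning 0 PySem.Dict.empty).getD q.1 0) :=
      List.Pairwise.imp_of_mem (fun hp hq hlt => by rw [hget _ hp, hget _ hq]; exact hlt) h2
    rw [show pvADedup reasoning ([] : List String) = (pvAnnot reasoning 0 []).map (fun p => p.1) from
      (pvAnnot_map_fst reasoning 0 []).symm, List.pairwise_map]
    exact h3
  -- permutation: the three blocks rearrange the deduplicated list
  have e2 : ((pvADedup reasoning []).filter (fun r => !pvP1 r)).filter (fun r => pvP2 r)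
      = (pvADedup reasoning []).filter (fun r => pvP2 r) := by
    rw [List.filter_filter]
    refine List.filter_congr ?_
    intro x _
    cases h2 : pvP2 x with
    | false => simp
    | true => simp [pvP2_not_pvP1 x h2]
  have e3 : ((pvADedup reasoning []).filter (fun r => !pvP1 r)).filter (fun r => !pvP2 r)
      = (pvADedup reasoning []).filter (fun r => !(pvP1 r || pvP2 r)) := by
    rw [List.filter_filter]
    refine List.filter_congr ?_
    intro x _
    cases h1 : pvP1 x <;> cases h2 : pvP2 x <;> simp
  have hperm : (((pvADedup reasoning []).filter (fun r => pvP1 r)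
        ++ (pvADedup reasoning []).filter (fun r => pvP2 r))
        ++ (pvADedup reasoning []).filter (fun r => !(pvP1 r || pvP2 r))).Perm (pvADedup reasoning []) := by
    have h1 := List.filter_append_perm (fun r => pvP1 r) (pvADedup reasoning [])
    have h2 := List.filter_append_perm (fun r => pvP2 r) ((pvADedup reasoning []).filter (fun r => !pvP1 r))
    rw [e2, e3] at h2
    rw [List.append_assoc]
    exact (List.Perm.append_left _ h2).trans h1
  -- pairwise strictly increasing lex keys on the concatenation
  have hkey : ∀ a b : String,
      (pvBucket a < pvBucket b ∨ (pvBucket a = pvBucket b ∧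
        (pvFirst reasoning 0 PySem.Dict.empty).getD a 0 < (pvFirst reasoning 0 PySem.Dict.empty).getD b 0)) →
      toLex (pvBucket a, (pvFirst reasoning 0 PySem.Dict.empty).getD a 0)
        < toLex (pvBucket b, (pvFirst reasoning 0 PySem.Dict.empty).getD b 0) := by
    intro a b h
    rw [Prod.Lex.lt_iff]
    exact h
  have hb1 : ∀ x ∈ (pvADedup reasoning []).filter (fun r => pvP1 r), pvBucket x = 0 := by
    intro x hx
    simp [pvBucket, (List.mem_filter.mp hx).2]
  have hb2 : ∀ x ∈ (pvADedup reasoning []).filter (fun r => pvP2 r), pvBucket x = 1 := by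
    intro x hx
    have h2 := (List.mem_filter.mp hx).2
    simp [pvBucket, pvP2_not_pvP1 x h2, h2]
  have hb3 : ∀ x ∈ (pvADedup reasoning []).filter (fun r => !(pvP1 r || pvP2 r)), pvBucket x = 2 := by
    intro x hx
    have h := (List.mem_filter.mp hx).2
    simp only [Bool.not_or, Bool.and_eq_true, Bool.not_eq_true'] at h
    simp [pvBucket, h.1, h.2]
  have hsubpw : ∀ (p : String → Bool), ((pvADedup reasoning []).filter p).Pairwise
      (fun a b => (pvFirst reasoning 0 PySem.Dict.empty).getD a 0 < (pvFirst reasoning 0 PySem.Dict.empty).getD b 0) :=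
    fun p => List.Pairwise.sublist List.filter_sublist hpairS
  have hpw : (((pvADedup reasoning []).filter (fun r => pvP1 r)
        ++ (pvADedup reasoning []).filter (fun r => pvP2 r))
        ++ (pvADedup reasoning []).filter (fun r => !(pvP1 r || pvP2 r))).Pairwise
      (fun a b => toLex (pvBucket a, (pvFirst reasoning 0 PySem.Dict.empty).getD a 0)
        < toLex (pvBucket b, (pvFirst reasoning 0 PySem.Dict.empty).getD b 0)) := by
    rw [List.pairwise_append]
    refine ⟨?_, ?_, ?_⟩
    · rw [List.pairwise_append]
      refine ⟨?_, ?_, ?_⟩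
      · exact List.Pairwise.imp_of_mem
          (fun ha hb h => hkey _ _ (Or.inr ⟨by rw [hb1 _ ha, hb1 _ hb], h⟩)) (hsubpw _)
      · exact List.Pairwise.imp_of_mem
          (fun ha hb h => hkey _ _ (Or.inr ⟨by rw [hb2 _ ha, hb2 _ hb], h⟩)) (hsubpw _)
      · intro a ha b hb
        exact hkey a b (Or.inl (by rw [hb1 a ha, hb2 b hb]; decide))
    · exact List.Pairwise.imp_of_mem
        (fun ha hb h => hkey _ _ (Or.inr ⟨by rw [hb3 _ ha, hb3 _ hb], h⟩)) (hsubpw _)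
    · intro a ha b hb
      rcases List.mem_append.mp ha with h | h
      · exact hkey a b (Or.inl (by rw [hb1 a h, hb3 b hb]; decide))
      · exact hkey a b (Or.inl (by rw [hb2 a h, hb3 b hb]; decide))
  rw [hkeys]
  exact PySem.List.sorted_eq_of_perm_of_pairwise_lt _ _ _ hperm hpw

-- ===== VERDICT (by name: the statement is the Claim_ definition above) =====
theorem sanitize_reasoning_py_spec : Claim_equal_sanitize_reasoning_py := by
  intro reasoning _
  unfold Spec_sanitize_reasoning_py
  exact (pv_main reasoning).symm
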